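-- pv_equiv track=rewrite | github.com/Nadben/Projet-Poker | poker_un_joueur.py | couleur
-- ===== SOURCE A (Python) =====
-- def couleur(cartes_joueur,cartes_devoile,pari):
--         carte_couleur = []
--         dic = {}
--
--         resultat = 0
--
--         for i in range(0,len(cartes_devoile)):
--             carte_couleur.append(cartes_devoile[i][1])
--
--         for j in carte_couleur :
--                 dic[j] = dic.get(j,0) + 1 # rempli le dictionnaire
--
--         for m,n in dic.items():
--             if n >= 5 :
--                 resultat = 1
--         return resultat
-- ===== SOURCE B (Python) =====
-- def couleur(cartes_joueur, cartes_devoile, pari):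
--     def flush(suits):
--         # recursive partition: split off all copies of the first suit,
--         # test that group, recurse on the remainder
--         if not suits:
--             return 0
--         s = suits[0]
--         same = [x for x in suits if x == s]
--         if len(same) >= 5:
--             return 1
--         return flush([x for x in suits if x != s])
--     return flush([c[1] for c in cartes_devoile])
-- ===== Notes on version B (the rewrite author's own statement) =====
-- stated objective: alternative
-- what changed: B replaces A's dictionary counter and items scan by a recursive partition: it repeatedly splits the suit list into the group equal to the first suit and the rest, answering 1 as soon as a group has size >= 5.
import Mathlib
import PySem

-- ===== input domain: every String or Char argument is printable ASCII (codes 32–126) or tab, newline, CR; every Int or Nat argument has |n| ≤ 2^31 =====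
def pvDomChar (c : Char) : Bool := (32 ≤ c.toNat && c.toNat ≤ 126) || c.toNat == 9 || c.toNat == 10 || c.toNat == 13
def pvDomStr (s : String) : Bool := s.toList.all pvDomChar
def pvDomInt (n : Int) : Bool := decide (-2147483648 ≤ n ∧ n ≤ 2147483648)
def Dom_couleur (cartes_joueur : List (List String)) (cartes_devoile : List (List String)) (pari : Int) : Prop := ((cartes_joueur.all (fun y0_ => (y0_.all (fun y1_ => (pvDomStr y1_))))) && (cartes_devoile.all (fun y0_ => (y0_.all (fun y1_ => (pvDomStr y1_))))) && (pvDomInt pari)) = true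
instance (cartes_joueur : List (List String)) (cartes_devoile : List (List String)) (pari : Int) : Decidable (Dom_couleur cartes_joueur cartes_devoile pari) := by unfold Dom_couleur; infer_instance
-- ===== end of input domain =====

-- ===== PORT A =====
-- B replaces the dict counter + items scan by a recursive partition on the first suit; objective: alternative (not faster).
-- A: collects cartes_devoile[i][1], counts occurrences in a dict, scans the dict values for one >= 5
def couleur (cartes_joueur : List (List String)) (cartes_devoile : List (List String)) (pari : Int) : Int :=
  let carte_couleur : List String :=
    (PySem.List.pyRange 0 (PySem.List.len cartes_devoile) 1).foldl
      (fun acc i => acc ++ [PySem.List.pyGetD (PySem.List.pyGetD cartes_devoile i []) 1 ""]) []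
  let dic : PySem.Dict String Int :=
    carte_couleur.foldl (fun d j => d.insert j (d.getD j 0 + 1)) PySem.Dict.empty
  dic.items.foldl (fun resultat p => if p.2 >= 5 then 1 else resultat) 0

-- ===== PORT B =====
-- recursive helper `flush` of Source B
def flushRec : List String → Int
  | [] => 0
  | s :: t =>
    let same := (s :: t).filter (fun x => x == s)
    if 5 ≤ same.length then 1
    else flushRec ((s :: t).filter (fun x => x != s))
termination_by suits => suits.length
decreasing_by
  simp only [List.filter_cons, bne_self_eq_false, Bool.false_eq_true, if_false, List.length_cons]
  exact Nat.lt_succ_of_le (List.length_filter_le _ _)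

def couleur_alt (cartes_joueur : List (List String)) (cartes_devoile : List (List String)) (pari : Int) : Int :=
  flushRec (cartes_devoile.map (fun c => PySem.List.pyGetD c 1 ""))

-- ===== PRECONDITION & SPEC =====
-- Pre_ excludes exactly the inputs where A raises IndexError: a revealed card with fewer than 2 entries.
def Pre_couleur (cartes_joueur : List (List String)) (cartes_devoile : List (List String)) (pari : Int) : Prop :=
  ∀ c ∈ cartes_devoile, 2 ≤ c.length
instance (cartes_joueur : List (List String)) (cartes_devoile : List (List String)) (pari : Int) : Decidable (Pre_couleur cartes_joueur cartes_devoile pari) := by unfold Pre_couleur; infer_instance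

def pvWitness_couleur : List (List String) × List (List String) × Int := ([], [["A", "s"], ["K", "s"]], 0)

def Spec_couleur (cartes_joueur : List (List String)) (cartes_devoile : List (List String)) (pari : Int) (out : Int) : Prop := out = couleur_alt cartes_joueur cartes_devoile pari
instance (cartes_joueur : List (List String)) (cartes_devoile : List (List String)) (pari : Int) (out : Int) : Decidable (Spec_couleur cartes_joueur cartes_devoile pari out) := by unfold Spec_couleur; infer_instance

-- ===== CLAIM (what is proved, stated in full; the proofs are below) =====
def Claim_equal_couleur : Prop := ∀ (cartes_joueur : List (List String)) (cartes_devoile : List (List String)) (pari : Int), Dom_couleur cartes_joueur cartes_devoile pari → Pre_couleur cartes_joueur cartes_devoile pari → Spec_couleur cartes_joueur cartes_devoile pari (couleur cartes_joueur cartes_devoile pari)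

-- ===== LEMMAS AND PROOFS =====

-- A's items scan: the fold returns 1 iff some item has count >= 5, else the accumulator.
theorem foldl_items_scan (l : List (String × Int)) (r : Int) :
    l.foldl (fun resultat p => if p.2 ≥ 5 then 1 else resultat) r
      = if l.any (fun p => decide (p.2 ≥ 5)) then 1 else r := by
  induction l generalizing r with
  | nil => simp
  | cons x xs ih =>
    simp only [List.foldl_cons, List.any_cons, ih]
    by_cases h : x.2 ≥ 5
    · simp [h]
    · by_cases ha : (xs.any fun p => decide (p.2 ≥ 5)) = true
      · simp [ha]
      · simp [ha, h]

-- the dict-items test over distinct suits equals the per-element test over all suits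
theorem any_items_eq_any_count (suits : List String) :
    ((PySem.Set.ofList suits).map (fun k => (k, (suits.count k : Int)))).any (fun p => decide (p.2 ≥ 5))
      = suits.any (fun s => decide (suits.count s ≥ 5)) := by
  rw [Bool.eq_iff_iff]
  simp only [List.any_map, List.any_eq_true, Function.comp, PySem.Set.mem_ofList]
  constructor
  · rintro ⟨k, hk, h5⟩; exact ⟨k, hk, by simpa using h5⟩
  · rintro ⟨k, hk, h5⟩; exact ⟨k, hk, by simpa using h5⟩

-- B's recursive partition computes the same any-count-≥-5 test
theorem flushRec_eq (l : List String) :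
    flushRec l = if l.any (fun s => decide (l.count s ≥ 5)) then 1 else 0 := by
  induction l using flushRec.induct with
  | case1 => simp [flushRec]
  | case2 s t same hle =>
    have hcount : ((s :: t).filter (fun x => x == s)).length = (s :: t).count s := by
      simp [List.count_eq_countP, List.countP_eq_length_filter]
    have hany : ((s :: t).any (fun x => decide ((s :: t).count x ≥ 5))) = true := by
      simp only [List.any_eq_true]
      refine ⟨s, by simp, ?_⟩
      exact decide_eq_true (le_of_le_of_eq hle hcount)
    rw [flushRec, if_pos hle, hany, if_pos rfl]
  | case3 s t same hnl ih =>
    rw [flushRec, if_neg hnl, ih]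
    have hcount : ((s :: t).filter (fun x => x == s)).length = (s :: t).count s := by
      simp [List.count_eq_countP, List.countP_eq_length_filter]
    have hrest : ∀ x ∈ (s :: t).filter (fun y => y != s),
        ((s :: t).filter (fun y => y != s)).count x = (s :: t).count x := by
      intro x hx
      have hxne : x ≠ s := by
        have := List.of_mem_filter hx
        simpa using this
      rw [List.count_filter]
      simp [hxne]
    have hEq : (((s :: t).filter (fun y => y != s)).any
          (fun x => decide (((s :: t).filter (fun y => y != s)).count x ≥ 5)))
        = ((s :: t).any (fun x => decide ((s :: t).count x ≥ 5))) := by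
      rw [Bool.eq_iff_iff]
      simp only [List.any_eq_true, decide_eq_true_eq]
      constructor
      · rintro ⟨x, hx, hc⟩
        exact ⟨x, List.mem_of_mem_filter hx, by rw [hrest x hx] at hc; exact hc⟩
      · rintro ⟨x, hx, hc⟩
        by_cases hxs : x = s
        · subst hxs
          exact absurd (le_of_le_of_eq hc hcount.symm) hnl
        · have hx' : x ∈ (s :: t).filter (fun y => y != s) :=
            List.mem_filter.2 ⟨hx, by simp [hxs]⟩
          exact ⟨x, hx', by rw [hrest x hx']; exact hc⟩
    rw [hEq]

-- ===== VERDICT =====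
theorem couleur_spec : Claim_equal_couleur := by
  intro cj cd pari _hDom _hPre
  unfold Spec_couleur couleur couleur_alt
  have hsuits :
      (PySem.List.pyRange 0 (PySem.List.len cd) 1).foldl
        (fun acc i => acc ++ [PySem.List.pyGetD (PySem.List.pyGetD cd i []) 1 ""]) []
        = cd.map (fun c => PySem.List.pyGetD c 1 "") := by
    rw [PySem.List.foldl_append_singleton_eq_map]
    have := PySem.List.map_pyGetD_pyRange_zero cd ([] : List String)
    calc (PySem.List.pyRange 0 (PySem.List.len cd) 1).map
            (fun i => PySem.List.pyGetD (PySem.List.pyGetD cd i []) 1 "")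
        = ((PySem.List.pyRange 0 (PySem.List.len cd) 1).map
            (fun i => PySem.List.pyGetD cd i [])).map (fun c => PySem.List.pyGetD c 1 "") := by
          simp [List.map_map]
      _ = cd.map (fun c => PySem.List.pyGetD c 1 "") := by rw [this]
  simp only [hsuits]
  rw [PySem.Dict.foldl_insert_getD_add_one_eq_counter, PySem.Dict.items_counter,
      foldl_items_scan, any_items_eq_any_count, flushRec_eq]
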